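-- pv_equiv track=rewrite | github.com/hanrajeong/Study_Algorithm | Algorithm/jiwon/July_31_03.py | solution
-- ===== SOURCE A (Python) =====
-- def solution(x):
--     answer = []
--
--     cnt = 0
--     zero = 0
--
--     while True:
--         if x == '1':
--             break
--         zero = zero + x.count("0")
--         x = x.replace("0", "")
--
--         x = bin(len(x))[2:]
--
--         cnt = cnt + 1
--
--     answer = [cnt, zero]
--
--     return answer
-- ===== SOURCE B (Python) =====
-- def chain_stats(n):
--     """(steps, zeros removed) for A's loop started at bin(n), for n >= 1."""
--     if n == 1:
--         return (0, 0)
--     p = bin(n).count('1')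
--     cnt, zero = chain_stats(p)
--     return (cnt + 1, zero + n.bit_length() - p)
--
-- def solution(x):
--     if x == '1':
--         return [0, 0]
--     ones = sum(c != '0' for c in x)
--     cnt, zero = chain_stats(ones)
--     return [cnt + 1, zero + len(x) - ones]
-- ===== Notes on version B (the rewrite author's own statement) =====
-- stated objective: simpler
-- what changed: B replaces A's in-place while-loop string simulation by a single counting pass over x plus a recursive helper chain_stats(n) on the integer popcount chain that composes (steps, zeros) totals bottom-up on the way back from the recursion, instead of mutating a binary string and two running accumulators each iteration.
-- outside the precondition, e.g. on solution('0'): A does not finish within the time limit, B raises RecursionError; on solution(''): A does not finish within the time limit, B raises RecursionError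
import Mathlib
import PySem

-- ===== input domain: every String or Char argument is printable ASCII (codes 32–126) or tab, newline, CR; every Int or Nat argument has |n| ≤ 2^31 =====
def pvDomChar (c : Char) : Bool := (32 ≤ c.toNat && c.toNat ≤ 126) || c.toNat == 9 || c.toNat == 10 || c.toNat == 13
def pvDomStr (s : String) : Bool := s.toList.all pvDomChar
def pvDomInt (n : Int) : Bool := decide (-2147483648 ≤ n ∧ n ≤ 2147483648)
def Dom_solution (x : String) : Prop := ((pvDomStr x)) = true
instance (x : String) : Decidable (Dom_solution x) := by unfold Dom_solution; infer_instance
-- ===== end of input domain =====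

-- B does one counting pass over x, then a recursive helper on the popcount chain that
-- composes (steps, zeros) totals bottom-up, instead of A's string-mutating while-loop.


-- ===== PORT A =====
-- A's 'while True' loop, made total with fuel; on every input satisfying Pre_solution the
-- loop runs at most x.length iterations (proved via pvLoopEq below), so the fuel is never exhausted.
def solutionLoop : Nat → String → Int → Int → List Int
  | 0, _, cnt, zero => [cnt, zero]
  | fuel + 1, x, cnt, zero =>
    if x = "1" then [cnt, zero]
    else
      let zero' := zero + (PySem.Str.count x "0" : Int)
      let x' := PySem.Str.replace x "0" ""
      let x'' := PySem.Str.slice (PySem.Int.pyBin (PySem.Str.len x')) (some 2) none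
      solutionLoop fuel x'' (cnt + 1) zero'

def solution (x : String) : List Int := solutionLoop (x.toList.length + 1) x 0 0

-- ===== PORT B =====
-- termination fact for chainStats: popcount of n is below n once n ≥ 2
theorem pvBitCount_lt (n : Nat) (hn : 2 ≤ n) : PySem.Int.bitCount (n : Int) < n := by
  induction n using Nat.strong_induction_on with
  | _ n ih =>
    rw [PySem.Int.bitCount_natCast (by omega)]
    by_cases h : n / 2 ≤ 1
    · have : PySem.Int.bitCount ((n / 2 : Nat) : Int) ≤ 1 := by
        interval_cases h2 : (n / 2) <;> decide
      omega
    · have := ih (n / 2) (Nat.div_lt_self (by omega) (by omega)) (by omega)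
      omega

-- port of B's recursive helper chain_stats (Python diverges at n = 0; that lies outside Pre_)
def chainStats (n : Nat) : Int × Int :=
  if _h : n ≤ 1 then (0, 0)
  else
    let p := PySem.Int.bitCount (n : Int)
    let r := chainStats p
    (r.1 + 1, r.2 + (PySem.Int.bitLength (n : Int) : Int) - (p : Int))
decreasing_by exact pvBitCount_lt n (by omega)

def solution_alt (x : String) : List Int :=
  if x = "1" then [0, 0]
  else
    let ones : Nat := x.toList.countP (fun c => !(c == '0'))
    let r := chainStats ones
    [r.1 + 1, r.2 + PySem.Str.len x - (ones : Int)]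

-- ===== PRECONDITION & SPEC =====
-- Pre_ excludes exactly the inputs on which A's while-loop never terminates (Python hangs):
-- strings consisting only of '0' characters (including the empty string).
def Pre_solution (x : String) : Prop := x.toList.any (fun c => c != '0') = true
instance (x : String) : Decidable (Pre_solution x) := by unfold Pre_solution; infer_instance

def pvWitness_solution : String := "110010"

def Spec_solution (x : String) (out : List Int) : Prop := out = solution_alt x
instance (x : String) (out : List Int) : Decidable (Spec_solution x out) := by unfold Spec_solution; infer_instance

-- ===== CLAIM =====
def Claim_equal_solution : Prop := ∀ (x : String), Dom_solution x → Pre_solution x → Spec_solution x (solution x)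

-- ===== LEMMAS AND PROOFS =====

-- canonical binary digits of m (what Nat.toDigits 2 m computes), in a shape fit for induction
def pvRep (m : Nat) : List Char :=
  if _h : m ≤ 1 then [Nat.digitChar (m % 2)]
  else pvRep (m / 2) ++ [Nat.digitChar (m % 2)]
decreasing_by exact Nat.div_lt_self (by omega) (by omega)

theorem pvToDigitsCore_eq (m : Nat) : ∀ (fuel : Nat) (ds : List Char), m < fuel →
    Nat.toDigitsCore 2 fuel m ds = pvRep m ++ ds := by
  induction m using Nat.strong_induction_on with
  | _ m ih =>
    intro fuel ds hfuel
    match fuel with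
    | 0 => omega
    | fuel + 1 =>
      rw [pvRep]
      by_cases h : m ≤ 1
      · have h2 : m / 2 = 0 := by omega
        simp [Nat.toDigitsCore, h2, h]
      · have h2 : m / 2 ≠ 0 := by omega
        have hlt : m / 2 < m := Nat.div_lt_self (by omega) (by omega)
        simp only [Nat.toDigitsCore, h2, if_false, h, dite_false]
        rw [ih (m / 2) hlt fuel _ (by omega)]
        simp

theorem pvToDigits_eq (m : Nat) : Nat.toDigits 2 m = pvRep m := by
  have := pvToDigitsCore_eq m (m + 1) [] (by omega)
  simpa [Nat.toDigits] using this

theorem pvRep_one : pvRep 1 = ['1'] := by rw [pvRep]; rfl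

theorem pvRep_ne_nil (m : Nat) : pvRep m ≠ [] := by
  rw [pvRep]; split <;> simp

theorem pvRep_ne_one (m : Nat) (hm : 2 ≤ m) : pvRep m ≠ ['1'] := by
  rw [pvRep]
  have h : ¬ m ≤ 1 := by omega
  simp only [h, dite_false]
  intro hcontra
  have := congrArg List.length hcontra
  simp at this
  exact pvRep_ne_nil _ this

theorem pvRep_count_zero (m : Nat) (hm : 1 ≤ m) :
    (pvRep m).count '0' + PySem.Int.bitCount (m : Int) = PySem.Int.bitLength (m : Int) := by
  induction m using Nat.strong_induction_on with
  | _ m ih =>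
    by_cases h : m ≤ 1
    · have h1 : m = 1 := by omega
      subst h1
      rw [pvRep_one]; decide
    · have hlt : m / 2 < m := Nat.div_lt_self (by omega) (by omega)
      have h1 : 1 ≤ m / 2 := by omega
      have hih := ih (m / 2) hlt h1
      rw [pvRep]
      simp only [h, dite_false, List.count_append]
      rw [PySem.Int.bitCount_natCast (by omega : 0 < m),
        PySem.Int.bitLength_natCast (by omega : 0 < m)]
      rcases (by omega : m % 2 = 0 ∨ m % 2 = 1) with hd | hd <;> rw [hd]
      · have hc : List.count '0' [Nat.digitChar 0] = 1 := by decide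
        omega
      · have hc : List.count '0' [Nat.digitChar 1] = 0 := by decide
        omega

theorem pvRep_filter (m : Nat) (hm : 1 ≤ m) :
    ((pvRep m).filter (fun a => !(a == '0'))).length = PySem.Int.bitCount (m : Int) := by
  induction m using Nat.strong_induction_on with
  | _ m ih =>
    by_cases h : m ≤ 1
    · have h1 : m = 1 := by omega
      subst h1
      rw [pvRep_one]; decide
    · have hlt : m / 2 < m := Nat.div_lt_self (by omega) (by omega)
      have h1 : 1 ≤ m / 2 := by omega
      have hih := ih (m / 2) hlt h1
      rw [pvRep]
      simp only [h, dite_false, List.filter_append, List.length_append]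
      rw [PySem.Int.bitCount_natCast (by omega : 0 < m)]
      rcases (by omega : m % 2 = 0 ∨ m % 2 = 1) with hd | hd <;> rw [hd]
      · have hc : ([Nat.digitChar 0].filter (fun a => !(a == '0'))).length = 0 := by decide
        omega
      · have hc : ([Nat.digitChar 1].filter (fun a => !(a == '0'))).length = 1 := by decide
        omega

-- single-character count / replace, reduced to List.count and List.filter
theorem pvCountGo_single (c : Char) : ∀ (l : List Char) (fuel acc : Nat), l.length ≤ fuel →
    PySem.Chars.count.go [c] fuel l acc = acc + l.count c := by
  intro l
  induction l with
  | nil => intro fuel acc _; cases fuel <;> simp [PySem.Chars.count.go]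
  | cons a t ih =>
    intro fuel acc hf
    match fuel with
    | 0 => simp at hf
    | fuel + 1 =>
      by_cases h : a = c
      · subst h
        simp only [PySem.Chars.count.go, List.isPrefixOf, List.length_cons] at *
        simp only [beq_self_eq_true, Bool.true_and, if_true,
          List.length_nil, List.drop_succ_cons, List.drop_zero]
        rw [ih fuel (acc + 1) (by omega)]
        simp; omega
      · have hb : (c == a) = false := by simp [Ne.symm h]
        simp only [PySem.Chars.count.go, List.isPrefixOf, hb, Bool.false_and]
        rw [ih fuel acc (by simp at hf; omega)]
        simp [h]

theorem pvCount_single (l : List Char) (c : Char) :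
    PySem.Chars.count l [c] = l.count c := by
  simp [PySem.Chars.count, pvCountGo_single c l l.length 0 (le_refl _)]

theorem pvReplaceGo_single (c : Char) : ∀ (l : List Char) (fuel : Nat) (acc : List Char),
    l.length ≤ fuel →
    PySem.Chars.replace.go [c] [] fuel l acc = acc.reverse ++ l.filter (fun a => !(a == c)) := by
  intro l
  induction l with
  | nil => intro fuel acc _; cases fuel <;> simp [PySem.Chars.replace.go]
  | cons a t ih =>
    intro fuel acc hf
    match fuel with
    | 0 => simp at hf
    | fuel + 1 =>
      by_cases h : a = c
      · subst h
        simp only [PySem.Chars.replace.go, List.isPrefixOf, beq_self_eq_true, Bool.true_and,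
          if_true, List.length_cons, List.reverse_nil, List.nil_append,
          List.length_nil, List.drop_succ_cons, List.drop_zero]
        rw [ih fuel acc (by simp at hf; omega)]
        simp
      · have hb : (c == a) = false := by simp [Ne.symm h]
        simp only [PySem.Chars.replace.go, List.isPrefixOf, hb, Bool.false_and]
        rw [ih fuel (a :: acc) (by simp at hf; omega)]
        simp [h]

theorem pvReplace_single (l : List Char) (c : Char) :
    PySem.Chars.replace l [c] [] = l.filter (fun a => !(a == c)) := by
  simp [PySem.Chars.replace, pvReplaceGo_single c l l.length [] (le_refl _)]

theorem pvFilterCount (l : List Char) :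
    (l.filter (fun a => !(a == '0'))).length + l.count '0' = l.length := by
  induction l with
  | nil => rfl
  | cons a t ih =>
    by_cases h : a = '0' <;> simp [h, ← ih] <;> omega

-- the binary string A maintains, as a list of chars: bin(k)[2:] for k ≥ 1
theorem pvSliceBin (k : Nat) :
    (PySem.Str.slice (PySem.Int.pyBin (k : Int)) (some 2) none).toList = pvRep k := by
  have hnn : ¬ ((k : Int) < 0) := by omega
  have ht : ((k : Int)).toNat = k := by omega
  rw [PySem.Str.toList_slice, PySem.Chars.slice_eq_listSlice,
    PySem.List.slice_from _ (by omega : (0:Int) ≤ 2)]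
  simp [PySem.Int.pyBin, PySem.Int.toBinChars0b, hnn, ht, pvToDigits_eq]

theorem pvBitCount_pos (m : Nat) (hm : 1 ≤ m) : 1 ≤ PySem.Int.bitCount (m : Int) := by
  induction m using Nat.strong_induction_on with
  | _ m ih =>
    rw [PySem.Int.bitCount_natCast (by omega)]
    by_cases h : m = 1
    · subst h; simp
    · have hd : m % 2 = 0 ∨ m % 2 = 1 := by omega
      rcases hd with hd | hd
      · have := ih (m / 2) (Nat.div_lt_self (by omega) (by omega)) (by omega)
        omega
      · omega

-- one step of chainStats at m ≥ 2, spelled out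
theorem chainStats_step (m : Nat) (hm : 2 ≤ m) :
    chainStats m = ((chainStats (PySem.Int.bitCount (m : Int))).1 + 1,
      (chainStats (PySem.Int.bitCount (m : Int))).2
        + (PySem.Int.bitLength (m : Int) : Int) - (PySem.Int.bitCount (m : Int) : Int)) := by
  rw [chainStats]
  have h : ¬ m ≤ 1 := by omega
  simp [h]

-- the core correspondence: A's loop on the string bin(m) computes chainStats m totals
theorem pvLoopEq : ∀ (fuel : Nat) (m : Nat), 1 ≤ m → m ≤ fuel → ∀ (x : String),
    x.toList = pvRep m → ∀ (cnt zero : Int),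
    solutionLoop fuel x cnt zero = [cnt + (chainStats m).1, zero + (chainStats m).2] := by
  intro fuel
  induction fuel with
  | zero => intro m hm hmf; omega
  | succ fuel ih =>
    intro m hm hmf x hx cnt zero
    by_cases h1 : m = 1
    · subst h1
      have hx1 : x = "1" := by
        rw [← String.toList_inj, hx, pvRep_one]; rfl
      have hc : chainStats 1 = (0, 0) := by rw [chainStats]; rfl
      simp [solutionLoop, hx1, hc]
    · have hm2 : 2 ≤ m := by omega
      have hxne : x ≠ "1" := by
        intro hc
        exact pvRep_ne_one m hm2 (by rw [← hx, hc]; rfl)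
      simp only [solutionLoop, hxne, if_false]
      have hcount : PySem.Str.count x "0" = (pvRep m).count '0' := by
        rw [PySem.Str.count_eq, hx]
        have : ("0" : String).toList = ['0'] := rfl
        rw [this, pvCount_single]
      have hlen : PySem.Str.len (PySem.Str.replace x "0" "") =
          (PySem.Int.bitCount (m : Int) : Int) := by
        rw [PySem.Str.len_eq, PySem.Str.toList_replace, hx]
        have h0 : ("0" : String).toList = ['0'] := rfl
        have he : ("" : String).toList = [] := rfl
        rw [h0, he, pvReplace_single, pvRep_filter m hm]
      have hk1 : 1 ≤ PySem.Int.bitCount (m : Int) := pvBitCount_pos m hm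
      have hkf : PySem.Int.bitCount (m : Int) ≤ fuel := by
        have := pvBitCount_lt m hm2
        omega
      have hx'' : (PySem.Str.slice (PySem.Int.pyBin (PySem.Str.len (PySem.Str.replace x "0" "")))
          (some 2) none).toList = pvRep (PySem.Int.bitCount (m : Int)) := by
        rw [hlen]; exact pvSliceBin _
      rw [ih (PySem.Int.bitCount (m : Int)) hk1 hkf _ hx'' (cnt + 1)
        (zero + (PySem.Str.count x "0" : Int)), hcount]
      rw [chainStats_step m hm2]
      have hz := pvRep_count_zero m hm
      simp only [List.cons.injEq, and_true]
      constructor <;> omega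

theorem solution_spec : Claim_equal_solution := by
  intro x _hdom hpre
  unfold Spec_solution solution solution_alt
  rw [solutionLoop]
  by_cases hx1 : x = "1"
  · simp [hx1]
  · simp only [hx1, if_false]
    -- k = number of non-'0' characters of x, at least 1 by Pre_
    set k : Nat := ((x.toList.filter (fun a => !(a == '0'))).length) with hk
    have hk1 : 1 ≤ k := by
      unfold Pre_solution at hpre
      rw [List.any_eq_true] at hpre
      obtain ⟨c, hc, hcne⟩ := hpre
      have : c ∈ x.toList.filter (fun a => !(a == '0')) := by
        rw [List.mem_filter]
        exact ⟨hc, by simpa using hcne⟩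
      have := List.length_pos_of_mem this
      omega
    have hkle : k ≤ x.toList.length := by
      rw [hk]; exact List.length_filter_le _ _
    have hlen : PySem.Str.len (PySem.Str.replace x "0" "") = (k : Int) := by
      rw [PySem.Str.len_eq, PySem.Str.toList_replace]
      have h0 : ("0" : String).toList = ['0'] := rfl
      have he : ("" : String).toList = [] := rfl
      rw [h0, he, pvReplace_single]
    have hx'' : (PySem.Str.slice (PySem.Int.pyBin (PySem.Str.len (PySem.Str.replace x "0" "")))
        (some 2) none).toList = pvRep k := by
      rw [hlen]; exact pvSliceBin k
    rw [pvLoopEq x.toList.length k hk1 hkle _ hx'' (0 + 1) (0 + (PySem.Str.count x "0" : Int))]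
    have hcount : PySem.Str.count x "0" = x.toList.count '0' := by
      rw [PySem.Str.count_eq]
      have : ("0" : String).toList = ['0'] := rfl
      rw [this, pvCount_single]
    have hones : x.toList.countP (fun c => !(c == '0')) = k := by
      rw [hk, List.countP_eq_length_filter]
    have hfc := pvFilterCount x.toList
    rw [hones]
    have hlenx : PySem.Str.len x = (x.toList.length : Int) := by rw [PySem.Str.len_eq]
    simp only [List.cons.injEq, and_true]
    constructor <;> [omega; (rw [hcount, hlenx]; omega)]
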